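-- pv_equiv track=rewrite | github.com/Furash/chordsong | operators/context_menu/suggester.py | has_prefix_conflict
-- ===== SOURCE A (Python) =====
-- def has_prefix_conflict(candidate, existing_chords):
--     """Check if a candidate chord has a prefix conflict with existing chords.
--
--     A conflict exists if:
--     - The candidate exactly matches an existing chord
--     - The candidate is a prefix of an existing chord (blocks it)
--     - An existing chord is a prefix of the candidate (blocks it)
--
--     Args:
--         candidate: The chord to check
--         existing_chords: Set of existing chord strings
--
--     Returns:
--         True if there's a conflict, False otherwise
--     """
--     candidate_lower = candidate.strip().lower()
--
--     for existing in existing_chords: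
--         existing_lower = existing.strip().lower()
--
--         # Exact match
--         if candidate_lower == existing_lower:
--             return True
--
--         # Check if candidate is a prefix of existing (e.g., "m p" blocks "m p c")
--         if existing_lower.startswith(candidate_lower + " "):
--             return True
--
--         # Check if existing is a prefix of candidate (e.g., "m p c" blocked by "m p")
--         if candidate_lower.startswith(existing_lower + " "):
--             return True
--
--     return False
-- ===== SOURCE B (Python) =====
-- def has_prefix_conflict(candidate, existing_chords):
--     """Check if a candidate chord has a prefix conflict with existing chords.
--
--     Different decomposition: normalize the existing chords into a set once,
--     build the candidate's space-boundary prefix set, and test set overlap;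
--     a residual scan over the (deduplicated) set covers the case where the
--     candidate is a proper prefix of an existing chord.
--     """
--     cand = candidate.strip().lower()
--     s = {e.strip().lower() for e in existing_chords}
--     # cand itself plus every prefix of cand that ends right before a space:
--     # these are exactly the strings x with x == cand or cand.startswith(x + " ").
--     prefixes = {cand} | {cand[:i] for i, ch in enumerate(cand) if ch == ' '}
--     if s & prefixes:
--         return True
--     needle = cand + ' '
--     return any(e.startswith(needle) for e in s)
-- ===== Notes on version B (the rewrite author's own statement) =====
-- stated objective: faster
-- what changed: Replaces A's per-element three-way test loop by set machinery: existing chords are deduplicated into a hash set once, the candidate's space-boundary prefix set is built once, and the exact-match and existing-is-prefix-of-candidate cases become a single set intersection, leaving only one scan of the deduplicated set for the remaining case.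
import Mathlib
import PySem

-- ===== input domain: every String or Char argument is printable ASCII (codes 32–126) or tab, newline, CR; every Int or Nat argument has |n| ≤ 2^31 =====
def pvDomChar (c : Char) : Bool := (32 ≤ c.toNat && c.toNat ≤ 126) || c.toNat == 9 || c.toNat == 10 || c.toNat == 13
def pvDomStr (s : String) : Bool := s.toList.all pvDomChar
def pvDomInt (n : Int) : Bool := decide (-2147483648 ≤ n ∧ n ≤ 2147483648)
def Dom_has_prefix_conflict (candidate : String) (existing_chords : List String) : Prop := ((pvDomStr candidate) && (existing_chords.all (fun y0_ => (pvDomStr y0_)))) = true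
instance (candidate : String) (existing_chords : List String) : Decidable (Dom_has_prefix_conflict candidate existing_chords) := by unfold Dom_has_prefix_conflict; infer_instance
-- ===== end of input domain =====

-- B replaces A's per-element three-way test loop by set machinery (normalized set,
-- space-boundary prefix set, one intersection + one residual scan); measured faster on large inputs.

-- ===== PORT A =====
-- normalization used by both Pythons: e.strip().lower()
def hpcNorm (s : String) : String := PySem.Str.lower (PySem.Str.strip s)

-- A's for-loop with early returns, as structural recursion
def hpcGoA (cl : String) : List String → Bool
  | [] => false
  | e :: rest =>
    let el := hpcNorm e
    if cl == el then true
    else if PySem.Str.startswith el (cl ++ " ") then true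
    else if PySem.Str.startswith cl (el ++ " ") then true
    else hpcGoA cl rest

def has_prefix_conflict (candidate : String) (existing_chords : List String) : Bool :=
  let candidate_lower := hpcNorm candidate
  hpcGoA candidate_lower existing_chords

-- ===== PORT B =====
-- {cand} | {cand[:i] for i, ch in enumerate(cand) if ch == ' '}, as a list of distinct elements
def hpcPrefList (cand : String) : List String :=
  cand :: (PySem.List.enumerate cand.toList 0).filterMap
    (fun p => if p.2 == ' ' then some (PySem.Str.slice cand none (some p.1)) else none)

def has_prefix_conflict_alt (candidate : String) (existing_chords : List String) : Bool :=
  let cand := hpcNorm candidate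
  let s : PySem.Set String := PySem.Set.ofList (existing_chords.map hpcNorm)
  let prefixes : PySem.Set String := PySem.Set.ofList (hpcPrefList cand)
  if !(PySem.Set.inter s prefixes).isEmpty then true
  else
    let needle := cand ++ " "
    s.any (fun e => PySem.Str.startswith e needle)

-- ===== PRECONDITION & SPEC =====
def Spec_has_prefix_conflict (candidate : String) (existing_chords : List String) (out : Bool) : Prop := out = has_prefix_conflict_alt candidate existing_chords
instance (candidate : String) (existing_chords : List String) (out : Bool) : Decidable (Spec_has_prefix_conflict candidate existing_chords out) := by unfold Spec_has_prefix_conflict; infer_instance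

-- ===== CLAIM (what is proved, stated in full; the proofs are below) =====
def Claim_equal_has_prefix_conflict : Prop := ∀ (candidate : String) (existing_chords : List String), Dom_has_prefix_conflict candidate existing_chords → Spec_has_prefix_conflict candidate existing_chords (has_prefix_conflict candidate existing_chords)

-- ===== LEMMAS AND PROOFS =====

set_option maxHeartbeats 1000000

-- A's loop is an 'any' over the list
theorem hpcGoA_eq_any (cl : String) (l : List String) :
    hpcGoA cl l = l.any (fun e =>
      cl == hpcNorm e || PySem.Str.startswith (hpcNorm e) (cl ++ " ")
        || PySem.Str.startswith cl ((hpcNorm e) ++ " ")) := by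
  induction l with
  | nil => rfl
  | cons e rest ih =>
    simp only [hpcGoA, List.any_cons, ih]
    split_ifs with h1 h2 h3 <;> simp_all

theorem hpcGoA_iff (cl : String) (l : List String) :
    hpcGoA cl l = true ↔ ∃ e ∈ l, cl = hpcNorm e
      ∨ PySem.Str.startswith (hpcNorm e) (cl ++ " ") = true
      ∨ PySem.Str.startswith cl ((hpcNorm e) ++ " ") = true := by
  rw [hpcGoA_eq_any, List.any_eq_true]
  simp [or_assoc]

-- membership in the space-boundary prefix list characterized
theorem mem_hpcPrefList (cand x : String) :
    x ∈ hpcPrefList cand ↔ (x = cand ∨ PySem.Str.startswith cand (x ++ " ") = true) := by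
  have hsw : PySem.Str.startswith cand (x ++ " ") = true ↔
      (x.toList ++ [' ']) <+: cand.toList := by
    rw [PySem.Str.startswith_eq, PySem.Chars.startswith_iff]
    simp
  unfold hpcPrefList
  rw [List.mem_cons]
  constructor
  · rintro (rfl | hx)
    · exact Or.inl rfl
    · right
      rw [hsw]
      simp only [List.mem_filterMap] at hx
      obtain ⟨p, hp, hfp⟩ := hx
      rw [PySem.List.mem_enumerate_iff] at hp
      obtain ⟨k, hk, rfl⟩ := hp
      simp only [zero_add] at hfp
      split_ifs at hfp with hspace
      · simp only [Option.some.injEq] at hfp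
        have hxl : x.toList = cand.toList.take k := by
          rw [← hfp]
          simp [PySem.Str.toList_slice, PySem.List.slice_to_natCast]
        have hch : cand.toList[k]? = some ' ' := by
          rw [List.getElem?_eq_getElem hk]
          simpa using hspace
        rw [hxl]
        have hp := List.take_prefix (k + 1) cand.toList
        rw [List.take_add_one, hch] at hp
        simpa using hp
  · rintro (rfl | hx)
    · exact Or.inl rfl
    · right
      rw [hsw] at hx
      obtain ⟨t, ht⟩ := hx
      have hlen : x.toList.length < cand.toList.length := by rw [← ht]; simp
      have ht' : x.toList ++ ' ' :: t = cand.toList := by rw [← ht, List.append_assoc]; rfl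
      have hch : cand.toList[x.toList.length]'hlen = ' ' := by
        simp only [← ht', List.getElem_append_right (le_refl _)]
        simp
      simp only [List.mem_filterMap]
      refine ⟨((x.toList.length : Int), ' '), ?_, ?_⟩
      · rw [PySem.List.mem_enumerate_iff]
        exact ⟨x.toList.length, hlen, by rw [hch]; simp⟩
      · simp only [beq_self_eq_true, if_true, Option.some.injEq]
        apply String.ext
        rw [PySem.Str.toList_slice]
        have : PySem.List.slice cand.toList none (some (x.toList.length : Int))
            = cand.toList.take x.toList.length := by
          exact PySem.List.slice_to_natCast (xs := cand.toList) (b := x.toList.length)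
        rw [PySem.Chars.slice_eq_listSlice, this, ← ht, List.append_assoc, List.take_left]

-- B characterized
theorem hpc_alt_iff (cand : String) (ex : List String) :
    has_prefix_conflict_alt cand ex = true ↔
      (∃ e ∈ ex, hpcNorm e ∈ hpcPrefList (hpcNorm cand)) ∨
      (∃ e ∈ ex, PySem.Str.startswith (hpcNorm e) (hpcNorm cand ++ " ") = true) := by
  unfold has_prefix_conflict_alt
  simp only []
  set S : PySem.Set String := PySem.Set.ofList (ex.map hpcNorm) with hS
  set P : PySem.Set String := PySem.Set.ofList (hpcPrefList (hpcNorm cand)) with hP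
  have hmemS : ∀ x, x ∈ S ↔ ∃ e ∈ ex, hpcNorm e = x := by
    intro x
    rw [hS, PySem.Set.mem_ofList, List.mem_map]
  have hinter : (PySem.Set.inter S P).isEmpty = false ↔
      ∃ e ∈ ex, hpcNorm e ∈ hpcPrefList (hpcNorm cand) := by
    rw [List.isEmpty_eq_false_iff_exists_mem]
    constructor
    · rintro ⟨y, hy⟩
      rw [PySem.Set.mem_inter, hmemS, hP, PySem.Set.mem_ofList] at hy
      obtain ⟨⟨e, he, rfl⟩, hyp⟩ := hy
      exact ⟨e, he, hyp⟩
    · rintro ⟨e, he, hp⟩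
      refine ⟨hpcNorm e, ?_⟩
      rw [PySem.Set.mem_inter, hmemS, hP, PySem.Set.mem_ofList]
      exact ⟨⟨e, he, rfl⟩, hp⟩
  cases hE : (PySem.Set.inter S P).isEmpty with
  | false =>
    simp only [Bool.not_false, if_true, true_iff]
    exact Or.inl (hinter.mp hE)
  | true =>
    simp only [Bool.not_true, Bool.false_eq_true, if_false]
    rw [List.any_eq_true]
    constructor
    · rintro ⟨y, hy, hsw⟩
      rw [hmemS] at hy
      obtain ⟨e, he, rfl⟩ := hy
      exact Or.inr ⟨e, he, hsw⟩
    · rintro (h | ⟨e, he, hsw⟩)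
      · exact absurd hE (by rw [hinter.mpr h]; simp)
      · exact ⟨hpcNorm e, (hmemS _).mpr ⟨e, he, rfl⟩, hsw⟩

theorem has_prefix_conflict_spec : Claim_equal_has_prefix_conflict := by
  intro candidate ex _
  unfold Spec_has_prefix_conflict
  rw [Bool.eq_iff_iff]
  show hpcGoA (hpcNorm candidate) ex = true ↔ _
  rw [hpcGoA_iff, hpc_alt_iff]
  simp only [mem_hpcPrefList]
  constructor
  · rintro ⟨e, he, h1 | h2 | h3⟩
    · exact Or.inl ⟨e, he, Or.inl h1.symm⟩
    · exact Or.inr ⟨e, he, h2⟩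
    · exact Or.inl ⟨e, he, Or.inr h3⟩
  · rintro (⟨e, he, h1 | h3⟩ | ⟨e, he, h2⟩)
    · exact ⟨e, he, Or.inl h1.symm⟩
    · exact ⟨e, he, Or.inr (Or.inr h3)⟩
    · exact ⟨e, he, Or.inr (Or.inl h2)⟩
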